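-- pv_equiv track=rewrite | github.com/angeonseok/APS_angeonseok | SWEA/역량테스트/2383.점심 식사시간.py | calc
-- ===== SOURCE A (Python) =====
-- def calc(arr, length):
--     if not arr:
--         return 0
--
--     # 도착 시간 빠른 순으로 처리
--     arr.sort()
--     end = []
--
--     for i in range(len(arr)):
--         # 처음 3명은 도착하면 바로 내려감
--         if i < 3:
--             start = arr[i]
--         else:
--             # 4번째부터는 3명 제한 때문에 앞에서 3칸 먼저 들어간 놈 끝날 때까지 대기 가능
--             start = max(arr[i], end[i - 3])
--
--         # 내려가기 시작한 시간 + 계단 길이 = 끝나는 시간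
--         end.append(start + length)
--
--     # 마지막 사람 끝나는 시간이 그 계단 종료 시간
--     return end[-1]
-- ===== SOURCE B (Python) =====
-- def calc(arr, length):
--     # Three-slot scheduler: each of the 3 stair positions keeps its free time.
--     # Sorts arr in place, like the original.
--     if not arr:
--         return 0
--     arr.sort()
--     slots = []
--     for t in arr:
--         if len(slots) < 3:
--             slots.append(t + length)
--         else:
--             m = min(slots)
--             i = slots.index(m)
--             slots[i] = max(t, m) + length
--     return max(slots)
-- ===== Notes on version B (the rewrite author's own statement) =====
-- stated objective: alternative
-- what changed: Replaces A's full end-times list indexed at i-3 by a 3-slot scheduler that keeps one free-time per stair position, each step overwriting the slot that frees earliest (min of the three) and finally returning the maximum slot; O(1) extra space instead of O(n), equal because with equal durations and sorted arrivals the earliest-freeing slot is exactly end[i-3].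
import Mathlib
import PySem

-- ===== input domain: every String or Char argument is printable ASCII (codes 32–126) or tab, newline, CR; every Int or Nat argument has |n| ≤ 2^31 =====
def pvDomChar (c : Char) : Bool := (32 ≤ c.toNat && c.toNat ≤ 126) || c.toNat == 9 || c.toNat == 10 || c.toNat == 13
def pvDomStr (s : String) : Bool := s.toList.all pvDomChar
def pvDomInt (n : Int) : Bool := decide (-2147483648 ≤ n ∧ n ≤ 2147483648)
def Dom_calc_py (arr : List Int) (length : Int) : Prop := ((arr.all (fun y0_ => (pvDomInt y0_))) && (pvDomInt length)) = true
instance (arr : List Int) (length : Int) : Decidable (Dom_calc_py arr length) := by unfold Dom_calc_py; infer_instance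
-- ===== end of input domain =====

-- B replaces A's full end-times list (indexed at i-3) by three stair-slot free-times,
-- always filling the slot that frees earliest; equivalence is about the RETURN value only
-- (Python A sorts arr in place; Python B does the same).

-- ===== PORT A =====
-- loop body of A's 'for i in range(len(arr))'
def calcStepA (s : List Int) (L : Int) (ends : List Int) (i : Int) : List Int :=
  let start := if i < 3 then PySem.List.pyGetD s i 0
               else max (PySem.List.pyGetD s i 0) (PySem.List.pyGetD ends (i - 3) 0)
  ends ++ [start + L]

def calc_py (arr : List Int) (length : Int) : Int :=
  if arr = [] then 0
  else
    let s := PySem.List.sorted arr (fun x => x) false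
    let ends := (PySem.List.pyRange 0 (s.length : Int) 1).foldl (calcStepA s length) []
    -- end[-1]; ends is nonempty because arr ≠ [], so the index is always in range
    PySem.List.pyGetD ends (-1) 0

-- ===== PORT B =====
-- loop body of B's 'for t in arr'
def calcStepB (L : Int) (slots : List Int) (t : Int) : List Int :=
  if slots.length < 3 then slots ++ [t + L]
  else
    match PySem.List.min? slots (fun x => x) with
    | none => slots   -- unreachable: slots has 3 elements here
    | some m =>
        -- i = slots.index(m); in range since m ∈ slots
        PySem.List.pySetD slots (((PySem.List.index? slots m).getD 0 : Nat) : Int) (max t m + L)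

def calc_py_alt (arr : List Int) (length : Int) : Int :=
  if arr = [] then 0
  else
    let s := PySem.List.sorted arr (fun x => x) false
    let slots := s.foldl (calcStepB length) []
    -- max(slots); slots nonempty because arr ≠ []
    (PySem.List.max? slots (fun x => x)).getD 0

-- ===== PRECONDITION & SPEC =====
def Spec_calc_py (arr : List Int) (length : Int) (out : Int) : Prop := out = calc_py_alt arr length
instance (arr : List Int) (length : Int) (out : Int) : Decidable (Spec_calc_py arr length out) := by unfold Spec_calc_py; infer_instance

-- ===== CLAIM (what is proved, stated in full; the proofs are below) =====
def Claim_equal_calc_py : Prop := ∀ (arr : List Int) (length : Int), Dom_calc_py arr length → Spec_calc_py arr length (calc_py arr length)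

-- ===== LEMMAS AND PROOFS =====

-- the value A appends when `ends` is the list built so far and `t` the current arrival
def nv (L : Int) (ends : List Int) (t : Int) : Int :=
  (if ends.length < 3 then t else max t (ends.getD (ends.length - 3) 0)) + L

-- A's loop, re-expressed structurally over the sorted list
def loopA (L : Int) : List Int → List Int → List Int
  | [], ends => ends
  | t :: ts, ends => loopA L ts (ends ++ [nv L ends t])

theorem length_loopA (L : Int) (rem : List Int) : ∀ ends, (loopA L rem ends).length = ends.length + rem.length := by
  induction rem with
  | nil => intro ends; simp [loopA]
  | cons t ts ih => intro ends; simp [loopA, ih]; omega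

theorem loopA_bridge (s : List Int) (L : Int) : ∀ (k : Nat) (ends : List Int), ends.length = k →
    (PySem.List.pyRange (k : Int) (s.length : Int) 1).foldl (calcStepA s L) ends
      = loopA L (s.drop k) ends := by
  intro k
  induction hn : s.length - k generalizing k with
  | zero =>
    intro ends hlen
    have hk : s.length ≤ k := by omega
    rw [PySem.List.pyRange_one_eq_nil (by exact_mod_cast hk), List.drop_eq_nil_of_le hk]
    simp [loopA]
  | succ n ih =>
    intro ends hlen
    have hk : k < s.length := by omega
    rw [PySem.List.pyRange_one_cons (by exact_mod_cast hk), List.foldl_cons]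
    have hstep : calcStepA s L ends (k : Int) = ends ++ [nv L ends (s[k])] := by
      have h1 : PySem.List.pyGetD s (k : Int) 0 = s[k] := by
        rw [PySem.List.pyGetD_natCast]
        exact List.getD_eq_getElem s 0 hk
      by_cases h3 : (k : Int) < 3
      · have h3' : ends.length < 3 := by omega
        simp only [calcStepA, nv]
        rw [if_pos h3, if_pos h3', h1]
      · have hh : ¬ ends.length < 3 := by omega
        have h2 : PySem.List.pyGetD ends ((k : Int) - 3) 0 = ends.getD (ends.length - 3) 0 := by
          have he : (k : Int) - 3 = ((ends.length - 3 : Nat) : Int) := by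
            push_cast [hlen]; omega
          rw [he, PySem.List.pyGetD_natCast]
        simp only [calcStepA, nv]
        rw [if_neg h3, if_neg hh, h1, h2]
    rw [hstep]
    have hdrop : s.drop k = s[k] :: s.drop (k + 1) := List.drop_eq_getElem_cons hk
    rw [hdrop]
    simp only [loopA]
    have : ((k : Int) + 1) = ((k + 1 : Nat) : Int) := by push_cast; ring
    rw [this, ih (k + 1) (by omega) _ (by simp [hlen])]

theorem sorted_le_getLast {l : List Int} (hs : l.Pairwise (· ≤ ·)) (hne : l ≠ []) :
    ∀ y ∈ l, y ≤ l.getLast hne := by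
  induction l with
  | nil => simp
  | cons a t ih =>
    intro y hy
    rcases List.mem_cons.1 hy with rfl | hyt
    · cases t with
      | nil => simp
      | cons b u =>
        have : b ≤ (b :: u).getLast (by simp) := ih (List.pairwise_cons.1 hs).2 (by simp) b (by simp)
        have hab : y ≤ b := (List.pairwise_cons.1 hs).1 b (by simp)
        simpa [List.getLast_cons] using le_trans hab this
    · cases t with
      | nil => simp at hyt
      | cons b u =>
        have := ih (List.pairwise_cons.1 hs).2 (by simp) y hyt
        simpa [List.getLast_cons] using this

theorem set_index_perm (slots : List Int) (m v : Int) (i : Nat)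
    (h : PySem.List.index? slots m = some i) :
    (slots.set i v).Perm (v :: slots.erase m) := by
  obtain ⟨pre, suf, rfl, rfl, hnm⟩ := (PySem.List.index?_eq_some_iff slots m i).1 h
  have hset : (pre ++ m :: suf).set pre.length v = pre ++ v :: suf := by
    rw [List.set_append_right _ _ (le_refl _)]; simp
  have herase : (pre ++ m :: suf).erase m = pre ++ suf := by
    rw [List.erase_append_right _ (by simpa using hnm)]; simp
  rw [hset, herase]
  exact List.perm_middle

theorem nv_mono (L : Int) (ends : List Int) (t t' : Int)
    (hp : ends.Pairwise (· ≤ ·)) (htt : t ≤ t') :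
    nv L ends t ≤ nv L (ends ++ [nv L ends t]) t' := by
  set a := nv L ends t with ha
  have hlen : (ends ++ [a]).length = ends.length + 1 := by simp
  have e1 : a = (if ends.length < 3 then t else max t (ends.getD (ends.length - 3) 0)) + L := ha
  have e2 : nv L (ends ++ [a]) t' =
      (if ends.length + 1 < 3 then t' else max t' ((ends ++ [a]).getD (ends.length + 1 - 3) 0)) + L := by
    unfold nv; rw [hlen]
  rw [e2]
  by_cases h1 : ends.length + 1 < 3
  · rw [if_pos h1, e1, if_pos (by omega)]; omega
  · rw [if_neg h1]
    by_cases h2 : ends.length < 3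
    · rw [e1, if_pos h2]
      have := le_max_left t' ((ends ++ [a]).getD (ends.length + 1 - 3) 0)
      omega
    · have hidx : ends.length + 1 - 3 < ends.length := by omega
      have hg1 : (ends ++ [a]).getD (ends.length + 1 - 3) 0 = ends.getD (ends.length + 1 - 3) 0 := by
        rw [List.getD_eq_getElem _ _ (by rw [hlen]; omega), List.getD_eq_getElem _ _ hidx,
          List.getElem_append_left hidx]
      rw [hg1, e1, if_neg h2]
      have hmono : ends.getD (ends.length - 3) 0 ≤ ends.getD (ends.length + 1 - 3) 0 := by
        rw [List.getD_eq_getElem _ _ (by omega), List.getD_eq_getElem _ _ hidx]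
        exact (List.pairwise_iff_getElem.1 hp) _ _ _ _ (by omega)
      have := max_le_max htt hmono
      omega

theorem main_inv (L : Int) : ∀ (rem ends slots : List Int),
    rem.Pairwise (· ≤ ·) →
    ends.Pairwise (· ≤ ·) →
    slots.Perm (ends.drop (ends.length - 3)) →
    (∀ t, rem.head? = some t → ∀ y ∈ ends, y ≤ nv L ends t) →
    (rem.foldl (calcStepB L) slots).Perm
        ((loopA L rem ends).drop ((loopA L rem ends).length - 3))
      ∧ (loopA L rem ends).Pairwise (· ≤ ·) := by
  intro rem
  induction rem with
  | nil => intro ends slots _ hpe hperm _; exact ⟨hperm, hpe⟩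
  | cons t ts ih =>
    intro ends slots hprem hpe hperm hbound
    have hbt : ∀ y ∈ ends, y ≤ nv L ends t := hbound t rfl
    have hpe' : (ends ++ [nv L ends t]).Pairwise (· ≤ ·) := by
      rw [List.pairwise_append]
      exact ⟨hpe, by simp, by intro y hy z hz; simp at hz; subst hz; exact hbt y hy⟩
    have hlen_slots : slots.length = ends.length - (ends.length - 3) := by
      rw [hperm.length_eq, List.length_drop]
    have hstep : (calcStepB L slots t).Perm
        ((ends ++ [nv L ends t]).drop ((ends ++ [nv L ends t]).length - 3)) := by
      by_cases hlt : ends.length < 3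
      · have hd0 : ends.length - 3 = 0 := by omega
        have hd0' : ends.length + 1 - 3 = 0 := by omega
        have hsl : slots.length < 3 := by omega
        simp only [calcStepB, if_pos hsl, List.length_append, List.length_cons, List.length_nil, hd0']
        rw [List.drop_zero]
        have : nv L ends t = t + L := by unfold nv; rw [if_pos hlt]
        rw [this]
        have := hperm.append_right [t + L]
        rwa [hd0, List.drop_zero] at this
      · have hsl : slots.length = 3 := by omega
        have hidx : ends.length - 3 < ends.length := by omega
        have hw : ends.drop (ends.length - 3) = ends[ends.length - 3] :: ends.drop (ends.length - 3 + 1) :=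
          List.drop_eq_getElem_cons hidx
        have hne : slots ≠ [] := by intro h; rw [h] at hsl; simp at hsl
        obtain ⟨m, hm⟩ : ∃ m, PySem.List.min? slots (fun x => x) = some m := by
          cases hmm : PySem.List.min? slots (fun x => x) with
          | none => exact absurd ((PySem.List.min?_eq_none_iff _ _).1 hmm) hne
          | some m => exact ⟨m, rfl⟩
        have hmmem : m ∈ slots := PySem.List.min?_mem hm
        have hmin : ∀ y ∈ slots, m ≤ y := by
          have := PySem.List.min?_isMin hm
          simpa using this
        have hmw : m ∈ ends.drop (ends.length - 3) := hperm.mem_iff.1 hmmem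
        have hheadmem : ends[ends.length - 3] ∈ slots := by
          rw [hperm.mem_iff, hw]; exact List.mem_cons_self
        have hpw : (ends.drop (ends.length - 3)).Pairwise (· ≤ ·) :=
          hpe.sublist (List.drop_sublist _ _)
        have hmeq : m = ends[ends.length - 3] := by
          have h1 : m ≤ ends[ends.length - 3] := hmin _ hheadmem
          have h2 : ends[ends.length - 3] ≤ m := by
            rw [hw] at hmw
            rcases List.mem_cons.1 hmw with h | h
            · omega
            · rw [hw] at hpw
              exact List.rel_of_pairwise_cons hpw h
          omega
        obtain ⟨i, hi⟩ : ∃ i, PySem.List.index? slots m = some i := by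
          cases hii : PySem.List.index? slots m with
          | none => exact absurd ((PySem.List.index?_eq_none_iff _ _).1 hii) (by simpa using hmmem)
          | some i => exact ⟨i, rfl⟩
        have hnv : nv L ends t = max t m + L := by
          unfold nv
          rw [if_neg hlt, List.getD_eq_getElem _ _ hidx, hmeq]
        simp only [calcStepB, if_neg (by omega : ¬ slots.length < 3), hm, hi, Option.getD_some,
          PySem.List.pySetD_natCast]
        have hp1 : (slots.set i (max t m + L)).Perm ((max t m + L) :: slots.erase m) :=
          set_index_perm slots m _ i hi
        have hp2 : (slots.erase m).Perm ((ends.drop (ends.length - 3)).erase m) := hperm.erase m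
        have hwe : (ends.drop (ends.length - 3)).erase m = ends.drop (ends.length - 3 + 1) := by
          rw [hw, hmeq, List.erase_cons_head]
        have htarget : (ends ++ [nv L ends t]).drop ((ends ++ [nv L ends t]).length - 3)
            = ends.drop (ends.length - 3 + 1) ++ [nv L ends t] := by
          have : (ends ++ [nv L ends t]).length - 3 = ends.length - 3 + 1 := by simp; omega
          rw [this, List.drop_append_of_le_length (by omega)]
        rw [htarget, hnv]
        refine hp1.trans (List.Perm.trans ?_ (List.perm_append_singleton _ _).symm)
        exact List.Perm.cons _ (hp2.trans (by rw [hwe]))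
    have hbound' : ∀ t', ts.head? = some t' → ∀ y ∈ ends ++ [nv L ends t], y ≤ nv L (ends ++ [nv L ends t]) t' := by
      intro t' ht' y hy
      have htt' : t ≤ t' := by
        have hmem : t' ∈ ts := by
          cases ts with
          | nil => simp at ht'
          | cons a u => simp at ht'; simp [ht']
        exact List.rel_of_pairwise_cons hprem hmem
      have hmono := nv_mono L ends t t' hpe htt'
      rcases List.mem_append.1 hy with h | h
      · exact le_trans (hbt y h) hmono
      · simp at h; subst h; exact hmono
    have := ih (ends ++ [nv L ends t]) (calcStepB L slots t) hprem.of_cons hpe' hstep hbound'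
    simpa [loopA] using this

-- A = B on every input
theorem calc_eq (arr : List Int) (L : Int) : calc_py arr L = calc_py_alt arr L := by
  by_cases h : arr = []
  · simp [calc_py, calc_py_alt, h]
  · simp only [calc_py, calc_py_alt, if_neg h]
    have hsne : PySem.List.sorted arr (fun x => x) false ≠ [] := by
      rw [Ne, PySem.List.sorted_eq_nil_iff]; exact h
    generalize hsdef : PySem.List.sorted arr (fun x => x) false = s at *
    have hp : s.Pairwise (· ≤ ·) := by
      rw [← hsdef]
      simpa using PySem.List.sorted_pairwise arr (fun x => x)
    -- A side: fold over indices = loopA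
    have hbridge : (PySem.List.pyRange 0 (s.length : Int) 1).foldl (calcStepA s L) [] = loopA L s [] := by
      have := loopA_bridge s L 0 [] rfl
      simpa using this
    rw [hbridge]
    obtain ⟨hperm, hpE⟩ := main_inv L s [] [] hp (by simp) (by simp) (by simp)
    generalize hE : loopA L s [] = E at *
    generalize hSl : s.foldl (calcStepB L) [] = slots at *
    have hlenE : E.length = s.length := by rw [← hE]; simpa using length_loopA L s []
    have hEne : E ≠ [] := by
      intro hnil; rw [hnil] at hlenE; exact hsne (List.eq_nil_of_length_eq_zero hlenE.symm)
    have hA : PySem.List.pyGetD E (-1) 0 = E.getLast hEne := PySem.List.pyGetD_neg_one E 0 hEne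
    have hslne : slots ≠ [] := by
      intro hnil
      have := hperm.length_eq
      rw [hnil] at this
      simp [List.length_drop] at this
      have h1 : 1 ≤ E.length := by
        rcases List.length_pos_iff.2 hEne with h'
        omega
      omega
    obtain ⟨M, hM⟩ : ∃ M, PySem.List.max? slots (fun x => x) = some M := by
      cases hmm : PySem.List.max? slots (fun x => x) with
      | none => exact absurd ((PySem.List.max?_eq_none_iff _ _).1 hmm) hslne
      | some M => exact ⟨M, rfl⟩
    rw [hA, hM]
    have hMmem : M ∈ slots := PySem.List.max?_mem hM
    have hMmax : ∀ y ∈ slots, y ≤ M := by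
      have := PySem.List.max?_isMax hM
      simpa using this
    have hlastmem : E.getLast hEne ∈ E.drop (E.length - 3) := by
      have hpos : 1 ≤ E.length := List.length_pos_iff.2 hEne
      have hlt : E.length - 1 - (E.length - 3) < (E.drop (E.length - 3)).length := by
        rw [List.length_drop]; omega
      have hgeq : (E.drop (E.length - 3))[E.length - 1 - (E.length - 3)]'hlt
          = E[E.length - 1]'(by omega) := by
        rw [List.getElem_drop]
        congr 1
        omega
      rw [List.getLast_eq_getElem hEne]
      exact hgeq ▸ List.getElem_mem hlt
    have hlast_slots : E.getLast hEne ∈ slots := hperm.mem_iff.2 hlastmem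
    have hMinE : M ∈ E := List.mem_of_mem_drop (hperm.mem_iff.1 hMmem)
    have h1 : E.getLast hEne ≤ M := hMmax _ hlast_slots
    have h2 : M ≤ E.getLast hEne := sorted_le_getLast hpE hEne M hMinE
    simp
    omega

-- ===== VERDICT (by name: the statement is the Claim_ definition above) =====
theorem calc_py_spec : Claim_equal_calc_py := by
  intro arr length _hdom
  unfold Spec_calc_py
  exact calc_eq arr length
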